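-- pv_equiv track=rewrite | github.com/eyobworku/booksBot | problem/newfog2.py | calculate_max_frequency
-- ===== SOURCE A (Python) =====
-- from collections import defaultdict
--
-- def calculate_max_frequency(arr):
--     mults = defaultdict(int)
--     for num in arr:
--         mults[num] += 1
--
--     tot = [0] * (len(arr) + 1)
--     ans = 0
--     for i in range(1, len(arr) + 1):
--         curr_mult = i
--         while curr_mult <= len(arr):
--             tot[curr_mult] += mults[i]
--             curr_mult += i
--
--         ans = max(ans, tot[i])
--
--     return ans
-- ===== SOURCE B (Python) =====
-- from collections import Counter
--
-- def calculate_max_frequency(arr):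
--     freq = Counter(arr)
--     n = len(arr)
--     ans = 0
--     for m in range(1, n + 1):
--         s = 0
--         d = 1
--         while d * d <= m:
--             if m % d == 0:
--                 s += freq[d]
--                 if m // d != d:
--                     s += freq[m // d]
--             d += 1
--         ans = max(ans, s)
--     return ans
-- ===== Notes on version B (the rewrite author's own statement) =====
-- stated objective: alternative
-- what changed: Replaced the shared sieve over a tot array (adding each value's frequency to all of its multiples, tracking a running max) by an independent per-m divisor enumeration: a Counter is built once and for each m in 1..n the frequencies of m's divisors are summed by trial division up to sqrt(m) (pairing d with m//d), taking the running max.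
import Mathlib
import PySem

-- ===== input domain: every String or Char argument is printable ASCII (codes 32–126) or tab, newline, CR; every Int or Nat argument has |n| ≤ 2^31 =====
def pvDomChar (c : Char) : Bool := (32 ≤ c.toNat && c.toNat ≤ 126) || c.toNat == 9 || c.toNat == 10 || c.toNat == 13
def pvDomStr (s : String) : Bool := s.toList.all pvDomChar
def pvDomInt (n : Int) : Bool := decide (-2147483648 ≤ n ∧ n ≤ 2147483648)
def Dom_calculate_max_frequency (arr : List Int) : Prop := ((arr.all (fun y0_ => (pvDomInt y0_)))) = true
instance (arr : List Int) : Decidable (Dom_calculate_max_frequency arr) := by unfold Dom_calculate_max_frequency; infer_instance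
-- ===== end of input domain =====

-- B replaces A's multiples-sieve over a shared tot array by an independent
-- per-m trial-division divisor sum over a Counter (alternative algorithm, not faster).

-- ===== PORT A =====
-- inner `while curr_mult <= len(arr)` loop: adds v (= mults[i]) at positions curr, curr+i, … ≤ n
def pvSieve (n i : Nat) (v : Int) (curr : Nat) (tot : List Int) : List Int :=
  if _h : 0 < i ∧ curr ≤ n then
    pvSieve n i v (curr + i) (tot.set curr (tot.getD curr 0 + v))
  else tot
termination_by n + 1 - curr
decreasing_by omega

def calculate_max_frequency (arr : List Int) : Int :=
  -- mults = defaultdict(int); for num in arr: mults[num] += 1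
  let mults := arr.foldl (fun d num => d.modify num 0 (· + 1)) PySem.Dict.empty
  let n := arr.length
  -- for i in range(1, n+1): inner while; ans = max(ans, tot[i])  (i = idx+1 over range n)
  let st := (List.range n).foldl (fun (st : List Int × Int) idx =>
      let i := idx + 1
      let tot := pvSieve n i (mults.getD (i : Int) 0) i st.1
      (tot, max st.2 (tot.getD i 0))) (List.replicate (n + 1) 0, 0)
  st.2

-- ===== PORT B =====
-- inner `while d * d <= m` loop: trial division, pairing divisor d with m // d
def pvDivLoop (freq : PySem.Dict Int Int) (m d : Nat) (s : Int) : Int :=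
  if _h : d * d ≤ m then
    pvDivLoop freq m (d + 1)
      (if m % d = 0 then
        (let s1 := s + freq.getD (d : Int) 0
         if m / d ≠ d then s1 + freq.getD ((m / d : Nat) : Int) 0 else s1)
       else s)
  else s
termination_by m + 1 - d
decreasing_by
  rcases Nat.eq_zero_or_pos d with h0 | h0
  · omega
  · have hdm : d ≤ d * d := Nat.le_mul_of_pos_left d h0
    omega

def calculate_max_frequency_alt (arr : List Int) : Int :=
  let freq := PySem.Dict.counter arr
  let n := arr.length
  -- for m in range(1, n+1): s = divisor-frequency sum of m; ans = max(ans, s)  (m = j+1)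
  (List.range n).foldl (fun ans j => max ans (pvDivLoop freq (j + 1) 1 0)) 0

-- ===== PRECONDITION & SPEC =====
def Spec_calculate_max_frequency (arr : List Int) (out : Int) : Prop := out = calculate_max_frequency_alt arr
instance (arr : List Int) (out : Int) : Decidable (Spec_calculate_max_frequency arr out) := by unfold Spec_calculate_max_frequency; infer_instance

-- ===== CLAIM (what is proved, stated in full; the proofs are below) =====
def Claim_equal_calculate_max_frequency : Prop := ∀ (arr : List Int), Dom_calculate_max_frequency arr → Spec_calculate_max_frequency arr (calculate_max_frequency arr)

-- ===== LEMMAS AND PROOFS =====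

-- sum of frequencies of the divisors of m that lie in 1..k
def pvT (arr : List Int) (k m : Nat) : Int :=
  ∑ i ∈ Finset.range k, (if (i + 1) ∣ m then (arr.count ((i : Int) + 1) : Int) else 0)

lemma pvSieve_length (n i : Nat) (v : Int) (curr : Nat) (tot : List Int) :
    (pvSieve n i v curr tot).length = tot.length := by
  fun_induction pvSieve with
  | case1 curr tot h ih => simpa using ih
  | case2 => rfl

lemma getD_set_ite (tot : List Int) (c m : Nat) (x : Int) :
    (tot.set c x).getD m 0 = if m = c ∧ c < tot.length then x else tot.getD m 0 := by
  by_cases h1 : m = c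
  · subst h1
    by_cases h2 : m < tot.length
    · simp [List.getD, h2]
    · simp [List.getD, h2]
  · simp [List.getD, Ne.symm h1, h1]

lemma pvSieve_getD (n i : Nat) (hi : 0 < i) (v : Int) (curr : Nat) (tot : List Int) (j : Nat) :
    (pvSieve n i v curr tot).getD j 0 =
      tot.getD j 0 + (if curr ≤ j ∧ j ≤ n ∧ j < tot.length ∧ i ∣ (j - curr) then v else 0) := by
  fun_induction pvSieve with
  | case1 curr tot h ih =>
    rw [ih]
    simp only [List.length_set, getD_set_ite]
    by_cases hcj : j = curr
    · subst hcj
      by_cases hinr : j < tot.length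
      · have h1 : j ≤ j ∧ j ≤ n ∧ j < tot.length ∧ i ∣ (j - j) := ⟨le_refl _, h.2, hinr, by simp⟩
        have h2 : ¬ (j + i ≤ j ∧ j ≤ n ∧ j < tot.length ∧ i ∣ (j - (j + i))) := by omega
        have h3 : j = j ∧ j < tot.length := ⟨rfl, hinr⟩
        rw [if_pos h1, if_neg h2, if_pos h3]
        ring
      · have h1 : ¬ (j ≤ j ∧ j ≤ n ∧ j < tot.length ∧ i ∣ (j - j)) := by tauto
        have h2 : ¬ (j + i ≤ j ∧ j ≤ n ∧ j < tot.length ∧ i ∣ (j - (j + i))) := by omega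
        have h3 : ¬ (j = j ∧ j < tot.length) := by tauto
        rw [if_neg h1, if_neg h2, if_neg h3]
    · have h3 : ¬ (j = curr ∧ curr < tot.length) := by tauto
      have hiff : (curr + i ≤ j ∧ j ≤ n ∧ j < tot.length ∧ i ∣ (j - (curr + i))) ↔
          (curr ≤ j ∧ j ≤ n ∧ j < tot.length ∧ i ∣ (j - curr)) := by
        constructor
        · rintro ⟨ha, hb, hc, d, hd⟩
          exact ⟨by omega, hb, hc, d + 1, by rw [Nat.mul_add, Nat.mul_one]; omega⟩
        · rintro ⟨ha, hb, hc, d, hd⟩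
          have hd1 : 1 ≤ d := by
            rcases Nat.eq_zero_or_pos d with rfl | hp
            · simp at hd; omega
            · exact hp
          refine ⟨?_, hb, hc, d - 1, ?_⟩
          · have h2 : i ≤ i * d := Nat.le_mul_of_pos_right i hd1
            omega
          · rw [Nat.mul_sub, Nat.mul_one]
            omega
      rw [if_neg h3]
      simp only [hiff]
  | case2 curr tot h =>
    have hno : ¬ (curr ≤ j ∧ j ≤ n ∧ j < tot.length ∧ i ∣ (j - curr)) := by omega
    simp [hno]

def pvF (freq : PySem.Dict Int Int) (m : Nat) (k : Nat) : Int :=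
  freq.getD (k : Int) 0 + if m / k ≠ k then freq.getD ((m / k : Nat) : Int) 0 else 0

lemma pvDivLoop_eq (freq : PySem.Dict Int Int) (m : Nat) (hm : 1 ≤ m) (d : Nat) (s : Int) :
    pvDivLoop freq m d s
      = s + ∑ k ∈ (Finset.Icc 1 m).filter (fun k => d ≤ k ∧ k * k ≤ m ∧ k ∣ m), pvF freq m k := by
  fun_induction pvDivLoop with
  | case1 d s h ih =>
    simp only [dite_eq_ite] at ih
    rw [ih]
    rcases Nat.eq_zero_or_pos d with rfl | hd
    · have hmod : ¬ (m % 0 = 0) := by omega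
      rw [if_neg hmod]
      have hset : (Finset.Icc 1 m).filter (fun k => 0 + 1 ≤ k ∧ k * k ≤ m ∧ k ∣ m)
          = (Finset.Icc 1 m).filter (fun k => 0 ≤ k ∧ k * k ≤ m ∧ k ∣ m) := by
        apply Finset.filter_congr
        intro k hk
        simp only [Finset.mem_Icc] at hk
        constructor <;> (intro h2; exact ⟨by omega, h2.2⟩)
      rw [hset]
    · have hmod : m % d = 0 ↔ d ∣ m := Nat.dvd_iff_mod_eq_zero.symm
      by_cases hdvd : d ∣ m
      · rw [if_pos (hmod.mpr hdvd)]
        have hins : (Finset.Icc 1 m).filter (fun k => d ≤ k ∧ k * k ≤ m ∧ k ∣ m)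
            = insert d ((Finset.Icc 1 m).filter (fun k => d + 1 ≤ k ∧ k * k ≤ m ∧ k ∣ m)) := by
          ext k
          simp only [Finset.mem_insert, Finset.mem_filter, Finset.mem_Icc]
          constructor
          · rintro ⟨hk, h1, h2, h3⟩
            by_cases hkd : k = d
            · exact Or.inl hkd
            · exact Or.inr ⟨hk, by omega, h2, h3⟩
          · rintro (h' | ⟨hk, h1, h2, h3⟩)
            · rw [h']
              have hdm : d ≤ d * d := Nat.le_mul_of_pos_left d hd
              exact ⟨⟨hd, by omega⟩, le_refl d, h, hdvd⟩
            · exact ⟨hk, by omega, h2, h3⟩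
        have hnot : d ∉ (Finset.Icc 1 m).filter (fun k => d + 1 ≤ k ∧ k * k ≤ m ∧ k ∣ m) := by
          simp only [Finset.mem_filter]
          rintro ⟨-, h1, -⟩
          omega
        rw [hins, Finset.sum_insert hnot]
        simp only [pvF]
        split_ifs <;> ring
      · rw [if_neg (fun hc => hdvd (hmod.mp hc))]
        congr 1
        apply Finset.sum_congr _ (fun _ _ => rfl)
        apply Finset.filter_congr
        intro k hk
        simp only [Finset.mem_Icc] at hk
        constructor
        · rintro ⟨h1, h2, h3⟩
          exact ⟨by omega, h2, h3⟩
        · rintro ⟨h1, h2, h3⟩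
          refine ⟨?_, h2, h3⟩
          rcases Nat.eq_or_lt_of_le h1 with rfl | hlt
          · exact absurd h3 hdvd
          · omega
  | case2 d s h =>
    have hempty : (Finset.Icc 1 m).filter (fun k => d ≤ k ∧ k * k ≤ m ∧ k ∣ m) = ∅ := by
      apply Finset.filter_false_of_mem
      rintro k hk ⟨h1, h2, -⟩
      have : d * d ≤ k * k := Nat.mul_le_mul h1 h1
      omega
    rw [hempty, Finset.sum_empty, add_zero]

lemma pv_sum_range_Icc (m : Nat) (g : Nat → Int) :
    (∑ i ∈ Finset.range m, g (i + 1)) = ∑ k ∈ Finset.Icc 1 m, g k := by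
  refine Finset.sum_nbij' (i := fun i => i + 1) (j := fun k => k - 1) ?_ ?_ ?_ ?_ ?_
  · intro a ha
    simp only [Finset.mem_range] at ha
    simp only [Finset.mem_Icc]
    omega
  · intro a ha
    simp only [Finset.mem_Icc] at ha
    simp only [Finset.mem_range]
    omega
  · intro a _
    show a + 1 - 1 = a
    omega
  · intro a ha
    simp only [Finset.mem_Icc] at ha
    show a - 1 + 1 = a
    omega
  · intro a _; rfl

lemma pv_pairing (f : Nat → Int) (m : Nat) (hm : 1 ≤ m) :
    (∑ k ∈ (Finset.Icc 1 m).filter (fun k => 1 ≤ k ∧ k * k ≤ m ∧ k ∣ m),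
        (f k + if m / k ≠ k then f (m / k) else 0))
      = ∑ i ∈ Finset.range m, (if (i + 1) ∣ m then f (i + 1) else 0) := by
  have hzero : m ≠ 0 := by omega
  -- RHS as a filtered sum over Icc 1 m
  have hR : (∑ i ∈ Finset.range m, (if (i + 1) ∣ m then f (i + 1) else 0))
      = ∑ k ∈ (Finset.Icc 1 m).filter (fun k => k ∣ m), f k := by
    rw [pv_sum_range_Icc m (fun k => if k ∣ m then f k else 0), ← Finset.sum_filter]
  rw [hR]
  -- drop the redundant 1 ≤ k
  have hL : (Finset.Icc 1 m).filter (fun k => 1 ≤ k ∧ k * k ≤ m ∧ k ∣ m)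
      = ((Finset.Icc 1 m).filter (fun k => k ∣ m)).filter (fun k => k * k ≤ m) := by
    rw [Finset.filter_filter]
    apply Finset.filter_congr
    intro k hk
    simp only [Finset.mem_Icc] at hk
    constructor
    · rintro ⟨-, h2, h3⟩; exact ⟨h3, h2⟩
    · rintro ⟨h3, h2⟩; exact ⟨hk.1, h2, h3⟩
  rw [hL]
  set Dv := (Finset.Icc 1 m).filter (fun k => k ∣ m) with hDv
  have hmem : ∀ k, k ∈ Dv ↔ (1 ≤ k ∧ k ≤ m ∧ k ∣ m) := by
    intro k
    simp only [hDv, Finset.mem_filter, Finset.mem_Icc]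
    tauto
  rw [← Finset.sum_filter_add_sum_filter_not Dv (fun k => k * k ≤ m) f]
  rw [Finset.sum_add_distrib]
  congr 1
  rw [← Finset.sum_filter]
  refine Finset.sum_nbij' (i := fun k => m / k) (j := fun k => m / k) ?_ ?_ ?_ ?_ ?_
  · rintro a ha
    simp only [Finset.mem_filter, hmem] at ha ⊢
    obtain ⟨⟨⟨ha1, ham, hadvd⟩, hsq⟩, hne⟩ := ha
    have hmul : a * (m / a) = m := Nat.mul_div_cancel' hadvd
    have hle : a ≤ m / a := by
      have := hsq.trans_eq hmul.symm
      exact Nat.le_of_mul_le_mul_left this ha1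
    have hlt : a < m / a := lt_of_le_of_ne hle (fun hE => hne hE.symm)
    refine ⟨⟨by omega, Nat.div_le_self m a, Nat.div_dvd_of_dvd hadvd⟩, ?_⟩
    intro hc
    have : (m / a) * a < (m / a) * (m / a) := by
      have hpos : 0 < m / a := by omega
      exact Nat.mul_lt_mul_of_le_of_lt (le_refl _) hlt hpos
    rw [Nat.mul_comm (m / a) a, hmul] at this
    omega
  · rintro a ha
    simp only [Finset.mem_filter, hmem] at ha ⊢
    obtain ⟨⟨ha1, ham, hadvd⟩, hsq⟩ := ha
    have hmul : a * (m / a) = m := Nat.mul_div_cancel' hadvd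
    have he1 : 1 ≤ m / a := Nat.one_le_div_iff (by omega) |>.mpr ham
    have hgt : m / a < a := by
      by_contra hc
      push_neg at hc
      have : a * a ≤ a * (m / a) := Nat.mul_le_mul_left a hc
      omega
    refine ⟨⟨⟨he1, Nat.div_le_self m a, Nat.div_dvd_of_dvd hadvd⟩, ?_⟩, ?_⟩
    · calc m / a * (m / a) ≤ m / a * a := Nat.mul_le_mul_left _ (by omega)
        _ = m := by rw [Nat.mul_comm]; exact hmul
    · rw [Nat.div_div_self hadvd hzero]
      omega
  · rintro a ha
    simp only [Finset.mem_filter, hmem] at ha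
    exact Nat.div_div_self ha.1.1.2.2 hzero
  · rintro a ha
    simp only [Finset.mem_filter, hmem] at ha
    exact Nat.div_div_self ha.1.2.2 hzero
  · intro a _; rfl

lemma pvDivLoop_T (arr : List Int) (m : Nat) (hm : 1 ≤ m) :
    pvDivLoop (PySem.Dict.counter arr) m 1 0 = pvT arr m m := by
  rw [pvDivLoop_eq _ m hm 1 0, zero_add]
  have hp := pv_pairing (fun k => (PySem.Dict.counter arr).getD ((k : Nat) : Int) 0) m hm
  simp only [pvF]
  rw [hp]
  unfold pvT
  apply Finset.sum_congr rfl
  intro i _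
  by_cases h : (i + 1) ∣ m
  · rw [if_pos h, if_pos h]
    have hc := PySem.Dict.getD_counter arr (((i : Nat) + 1 : Nat) : Int)
    push_cast at hc ⊢
    rw [hc]
  · rw [if_neg h, if_neg h]

-- one outer-loop step adds (count of i = k+1) to tot at each multiple of k+1 in 1..n
lemma pvT_succ (arr : List Int) (k j : Nat) (hj : 1 ≤ j) :
    pvT arr (k + 1) j = pvT arr k j
      + (if k + 1 ≤ j ∧ (k + 1) ∣ (j - (k + 1)) then (arr.count ((k : Int) + 1) : Int) else 0) := by
  unfold pvT
  rw [Finset.sum_range_succ]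
  congr 1
  have hiff : (k + 1 ≤ j ∧ (k + 1) ∣ (j - (k + 1))) ↔ (k + 1) ∣ j := by
    constructor
    · rintro ⟨h1, d, hd⟩
      exact ⟨d + 1, by rw [Nat.mul_add, Nat.mul_one]; omega⟩
    · rintro ⟨d, hd⟩
      have hd1 : 1 ≤ d := by
        rcases Nat.eq_zero_or_pos d with rfl | hp
        · omega
        · exact hp
      have h2 : k + 1 ≤ (k + 1) * d := Nat.le_mul_of_pos_right _ hd1
      refine ⟨by omega, d - 1, ?_⟩
      rw [Nat.mul_sub, Nat.mul_one]
      omega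
  simp only [hiff]

-- the outer fold invariant: tot holds the partial divisor sums, ans the running maximum
lemma pv_outer (arr : List Int) (k : Nat) (hk : k ≤ arr.length) :
    let n := arr.length
    let step := fun (st : List Int × Int) (idx : Nat) =>
      let i := idx + 1
      let tot := pvSieve n i ((PySem.Dict.counter arr).getD (i : Int) 0) i st.1
      (tot, max st.2 (tot.getD i 0))
    let st := (List.range k).foldl step (List.replicate (n + 1) 0, 0)
    st.1.length = n + 1
      ∧ (∀ j : Nat, st.1.getD j 0 = if 1 ≤ j ∧ j ≤ n then pvT arr k j else 0)
      ∧ st.2 = ((List.range k).map (fun j => pvT arr (j + 1) (j + 1))).foldl max 0 := by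
  intro n step
  induction k with
  | zero =>
    simp only [List.range_zero, List.foldl_nil, List.map_nil]
    refine ⟨by simp, fun j => ?_, by simp⟩
    by_cases h : 1 ≤ j ∧ j ≤ n
    · have hj : j < n + 1 := by omega
      simp [pvT, List.getD, hj, h]
    · by_cases h2 : j < n + 1
      · simp [List.getD, h2, h]
      · have hge : (List.replicate (n + 1) (0 : Int)).length ≤ j := by
          simp only [List.length_replicate]; omega
        simp [List.getD, List.getElem?_eq_none_iff.mpr hge, h]
  | succ k ih =>
    have hk' : k ≤ arr.length := by omega
    obtain ⟨ihlen, ihget, ihans⟩ := ih hk'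
    rw [List.range_succ, List.foldl_append, List.foldl_cons, List.foldl_nil]
    set st := (List.range k).foldl step (List.replicate (n + 1) 0, 0) with hst
    simp only [step]
    have hi : 0 < k + 1 := by omega
    have hlen' : (pvSieve n (k + 1) ((PySem.Dict.counter arr).getD (((k : Nat) + 1 : Nat) : Int) 0) (k + 1) st.1).length = n + 1 := by
      rw [pvSieve_length, ihlen]
    have hcnt : (PySem.Dict.counter arr).getD (((k : Nat) + 1 : Nat) : Int) 0 = (arr.count ((k : Int) + 1) : Int) := by
      simpa using PySem.Dict.getD_counter arr (((k : Nat) + 1 : Nat) : Int)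
    have hget' : ∀ j : Nat,
        (pvSieve n (k + 1) ((PySem.Dict.counter arr).getD (((k : Nat) + 1 : Nat) : Int) 0) (k + 1) st.1).getD j 0
          = if 1 ≤ j ∧ j ≤ n then pvT arr (k + 1) j else 0 := by
      intro j
      rw [pvSieve_getD n (k + 1) hi _ (k + 1) st.1 j, ihget j, ihlen, hcnt]
      by_cases h : 1 ≤ j ∧ j ≤ n
      · rw [if_pos h, if_pos h, pvT_succ arr k j h.1]
        congr 1
        have hjlt : j < n + 1 := by omega
        by_cases hc : k + 1 ≤ j ∧ (k + 1) ∣ (j - (k + 1))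
        · rw [if_pos ⟨hc.1, h.2, hjlt, hc.2⟩, if_pos hc]
        · have hne : ¬ (k + 1 ≤ j ∧ j ≤ n ∧ j < n + 1 ∧ (k + 1) ∣ (j - (k + 1))) := by tauto
          rw [if_neg hne, if_neg hc]
      · rw [if_neg h, if_neg h]
        have hne : ¬ (k + 1 ≤ j ∧ j ≤ n ∧ j < n + 1 ∧ (k + 1) ∣ (j - (k + 1))) := by omega
        rw [if_neg hne, add_zero]
    refine ⟨hlen', hget', ?_⟩
    have htop : (pvSieve n (k + 1) ((PySem.Dict.counter arr).getD (((k : Nat) + 1 : Nat) : Int) 0) (k + 1) st.1).getD (k + 1) 0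
        = pvT arr (k + 1) (k + 1) := by
      rw [hget' (k + 1), if_pos ⟨by omega, by omega⟩]
    simp only [List.map_append, List.map_cons, List.map_nil, List.foldl_append, List.foldl_cons, List.foldl_nil]
    rw [← ihans, htop]

-- main: A's value equals B's value
lemma pv_main (arr : List Int) : calculate_max_frequency arr = calculate_max_frequency_alt arr := by
  unfold calculate_max_frequency calculate_max_frequency_alt
  rw [← PySem.Dict.counter_eq_foldl]
  obtain ⟨-, -, hans⟩ := pv_outer arr arr.length (le_refl _)
  rw [hans]
  rw [← List.foldl_map (f := fun j => pvDivLoop (PySem.Dict.counter arr) (j + 1) 1 0) (g := max)]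
  congr 1
  apply List.map_congr_left
  intro j _
  rw [pvDivLoop_T arr (j + 1) (by omega)]

-- ===== VERDICT (by name: the statement is the Claim_ definition above) =====
theorem calculate_max_frequency_spec : Claim_equal_calculate_max_frequency := by
  intro arr _
  exact pv_main arr
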